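-- pv_equiv track=rewrite | github.com/Hans-digit/BASIC_DL_PRACTICE | MCTS_TTT/referee.py | _check_vertical_end
-- ===== SOURCE A (Python) =====
-- from operator import itemgetter
--
-- def _check_vertical_end(data):
--     get_data = list(data)
--     get_data = sorted(get_data, key=itemgetter(1, 0))
--     count = 0
--     for i in range(len(get_data) - 1):
--         if get_data[i + 1][1] == get_data[i][1]:
--             count += 1
--             if count == 2:
--                 return True
--             else:
--                 pass
--         else:
--             count = 0
--     return False
-- ===== SOURCE B (Python) =====
-- def _check_vertical_end(data):
--     counts = {}
--     for entry in data:
--         col = entry[1]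
--         counts[col] = counts.get(col, 0) + 1
--     return any(v >= 3 for v in counts.values())
-- ===== Notes on version B (the rewrite author's own statement) =====
-- stated objective: simpler
-- what changed: Replaced the sort-by-(col,row) plus consecutive-run scan with a single-pass frequency dictionary over entry[1] followed by an any(count >= 3) threshold check.
import Mathlib
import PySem

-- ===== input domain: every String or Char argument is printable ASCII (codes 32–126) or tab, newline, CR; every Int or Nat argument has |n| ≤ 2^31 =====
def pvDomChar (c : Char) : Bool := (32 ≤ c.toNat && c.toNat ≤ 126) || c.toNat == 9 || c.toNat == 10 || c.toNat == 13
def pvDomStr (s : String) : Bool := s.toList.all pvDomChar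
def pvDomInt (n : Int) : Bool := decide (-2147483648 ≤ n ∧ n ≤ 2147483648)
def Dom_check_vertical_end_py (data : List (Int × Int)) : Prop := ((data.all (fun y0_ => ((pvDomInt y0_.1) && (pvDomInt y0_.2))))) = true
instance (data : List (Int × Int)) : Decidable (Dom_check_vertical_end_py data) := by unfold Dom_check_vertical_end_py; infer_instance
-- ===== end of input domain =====

-- B replaces A's sort + consecutive-run scan with a one-pass frequency dictionary and a
-- threshold check (simpler: no sort, no adjacency state machine).

-- ===== PORT A =====
-- the 'for i in range(len(get_data)-1)' loop comparing get_data[i+1][1] with get_data[i][1],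
-- as the obvious structural recursion over adjacent pairs, with the same 'count' state and
-- the same early return
def pvLoopA : List (Int × Int) → Int → Bool
  | x :: y :: rest, count =>
      if y.2 = x.2 then
        if count + 1 = 2 then true else pvLoopA (y :: rest) (count + 1)
      else pvLoopA (y :: rest) 0
  | _, _ => false

def check_vertical_end_py (data : List (Int × Int)) : Bool :=
  pvLoopA (PySem.List.sorted2 data (fun e => e.2) (fun e => e.1)) 0

-- ===== PORT B =====
def check_vertical_end_py_alt (data : List (Int × Int)) : Bool :=
  (data.foldl (fun d e => d.insert e.2 (d.getD e.2 0 + 1)) (PySem.Dict.empty : PySem.Dict Int Int)).values.any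
    (fun v => decide (3 ≤ v))

-- ===== PRECONDITION & SPEC =====
def Spec_check_vertical_end_py (data : List (Int × Int)) (out : Bool) : Prop := out = check_vertical_end_py_alt data
instance (data : List (Int × Int)) (out : Bool) : Decidable (Spec_check_vertical_end_py data out) := by unfold Spec_check_vertical_end_py; infer_instance

-- ===== CLAIM (what is proved, stated in full; the proofs are below) =====
def Claim_equal_check_vertical_end_py : Prop := ∀ (data : List (Int × Int)), Dom_check_vertical_end_py data → Spec_check_vertical_end_py data (check_vertical_end_py data)

-- ===== LEMMAS AND PROOFS =====

-- count of column c among the entries of l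
def csnd (c : Int) (l : List (Int × Int)) : Nat := (l.map Prod.snd).count c

-- the (non-strict) lexicographic order A sorts by: second component, then first
def lexle (a b : Int × Int) : Prop := a.2 < b.2 ∨ (a.2 = b.2 ∧ a.1 ≤ b.1)

-- sorted2's comparison function, specialised to keys (snd, fst)
def pvBef (a b : Int × Int) : Bool :=
  decide (a.2 < b.2) || (!decide (b.2 < a.2) && decide (a.1 < b.1))

lemma pvBef_false_iff (a b : Int × Int) : pvBef b a = false ↔ lexle a b := by
  simp only [pvBef, lexle, Bool.or_eq_false_iff, Bool.and_eq_false_iff,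
    Bool.not_eq_false', decide_eq_true_eq, decide_eq_false_iff_not]
  omega

lemma pvBef_true_le {a b : Int × Int} (h : pvBef a b = true) : lexle a b := by
  simp only [pvBef, lexle, Bool.or_eq_true, Bool.and_eq_true,
    Bool.not_eq_true', decide_eq_true_eq, decide_eq_false_iff_not] at *
  omega

lemma lexle_trans {a b c : Int × Int} (h1 : lexle a b) (h2 : lexle b c) : lexle a c := by
  unfold lexle at *; omega

lemma pairwise_insertBy (x : Int × Int) (l : List (Int × Int))
    (h : l.Pairwise lexle) :
    (PySem.List.insertBy pvBef x l).Pairwise lexle := by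
  induction l with
  | nil => simp [PySem.List.insertBy]
  | cons y ys ih =>
      rw [List.pairwise_cons] at h
      simp only [PySem.List.insertBy]
      by_cases hb : pvBef x y = true
      · simp only [hb, if_true]
        have hxy : lexle x y := pvBef_true_le hb
        refine List.Pairwise.cons ?_ (List.Pairwise.cons h.1 h.2)
        intro z hz
        rcases List.mem_cons.mp hz with rfl | hz
        · exact hxy
        · exact lexle_trans hxy (h.1 z hz)
      · rw [Bool.not_eq_true] at hb
        simp only [hb, Bool.false_eq_true, if_false]
        refine List.Pairwise.cons ?_ (ih h.2)
        intro z hz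
        rw [PySem.List.mem_insertBy] at hz
        rcases hz with rfl | hz
        · exact (pvBef_false_iff y _).mp hb
        · exact h.1 z hz

lemma foldl_insertBy_pairwise (xs : List (Int × Int)) :
    ∀ acc : List (Int × Int), acc.Pairwise lexle →
      (xs.foldl (fun a x => PySem.List.insertBy pvBef x a) acc).Pairwise lexle := by
  induction xs with
  | nil => intro acc h; simpa using h
  | cons x xs ih =>
      intro acc h
      exact ih _ (pairwise_insertBy x acc h)

lemma sorted2_eq_foldl (data : List (Int × Int)) :
    PySem.List.sorted2 data (fun e => e.2) (fun e => e.1) false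
      = data.foldl (fun acc x => PySem.List.insertBy pvBef x acc) [] := rfl

lemma sorted2_pairwise_lexle (data : List (Int × Int)) :
    (PySem.List.sorted2 data (fun e => e.2) (fun e => e.1) false).Pairwise lexle := by
  rw [sorted2_eq_foldl]
  exact foldl_insertBy_pairwise data [] (List.Pairwise.nil)

lemma csnd_cons (c : Int) (x : Int × Int) (l : List (Int × Int)) :
    csnd c (x :: l) = (if x.2 = c then 1 else 0) + csnd c l := by
  by_cases h : x.2 = c
  · simp [csnd, h]
    omega
  · simp [csnd, h]

lemma csnd_pos_mem {c : Int} {l : List (Int × Int)} (h : 0 < csnd c l) :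
    ∃ p ∈ l, p.2 = c := by
  unfold csnd at h
  rw [List.count_pos_iff] at h
  rcases List.mem_map.mp h with ⟨p, hp, hpc⟩
  exact ⟨p, hp, hpc⟩

-- characterisation of A's adjacent-run loop on a lexle-sorted list:
-- it finds a run of 3 iff some column occurs >= 3 times (k credits the head's run)
lemma loopA_char (rest : List (Int × Int)) :
    ∀ (x : Int × Int), (x :: rest).Pairwise lexle → ∀ k : Int, 0 ≤ k → k ≤ 1 →
      (pvLoopA (x :: rest) k = true ↔
        3 ≤ k + 1 + (csnd x.2 rest : Int) ∨ ∃ c, c ≠ x.2 ∧ 3 ≤ (csnd c rest : Int)) := by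
  induction rest with
  | nil =>
      intro x _ k hk0 hk1
      constructor
      · intro h; simp [pvLoopA] at h
      · rintro (h | ⟨c, _, hc⟩)
        · exfalso
          simp only [csnd, List.map_nil, List.count_nil] at h
          omega
        · exfalso
          simp only [csnd, List.map_nil, List.count_nil] at hc
          omega
  | cons y rs ih =>
      intro x hpw k hk0 hk1
      have hpw' : (y :: rs).Pairwise lexle := hpw.of_cons
      have hxy : lexle x y := (List.pairwise_cons.mp hpw).1 y List.mem_cons_self
      by_cases hyx : y.2 = x.2
      · -- equal columns: count increments
        simp only [pvLoopA, hyx, if_true]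
        by_cases hk : k + 1 = 2
        · simp only [hk, if_true]
          constructor
          · intro _
            left
            rw [csnd_cons, if_pos hyx]
            push_cast
            omega
          · intro _; trivial
        · simp only [hk, if_false]
          rw [ih y hpw' (k + 1) (by omega) (by omega)]
          constructor
          · rintro (h | ⟨c, hc, hcount⟩)
            · left
              rw [csnd_cons, if_pos hyx]
              rw [hyx] at h
              push_cast at h ⊢
              omega
            · right
              refine ⟨c, fun he => hc (he.trans hyx.symm), ?_⟩
              rw [csnd_cons, if_neg (fun h2 => hc h2.symm)]
              push_cast at hcount ⊢
              omega
          · rintro (h | ⟨c, hc, hcount⟩)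
            · left
              rw [csnd_cons, if_pos hyx] at h
              rw [hyx]
              push_cast at h ⊢
              omega
            · right
              refine ⟨c, fun he => hc (he.trans hyx), ?_⟩
              rw [csnd_cons, if_neg (fun h2 => hc (h2.symm.trans hyx))] at hcount
              push_cast at hcount ⊢
              omega
      · -- new column: x.2 < y.2 strictly, so x.2 never recurs after this point
        simp only [pvLoopA, hyx, if_false]
        have hlt : x.2 < y.2 := by
          rcases hxy with h | ⟨h, _⟩
          · exact h
          · exact absurd h.symm hyx
        have hx_absent : csnd x.2 (y :: rs) = 0 := by
          by_contra hne
          rcases csnd_pos_mem (Nat.pos_of_ne_zero hne) with ⟨p, hp, hpc⟩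
          rcases List.mem_cons.mp hp with rfl | hp
          · exact hyx hpc
          · have := (List.pairwise_cons.mp hpw').1 p hp
            rcases this with h2 | ⟨h2, _⟩ <;> omega
        rw [ih y hpw' 0 le_rfl (by omega)]
        constructor
        · rintro (h | ⟨c, hc, hcount⟩)
          · right
            refine ⟨y.2, fun he => hyx he, ?_⟩
            rw [csnd_cons, if_pos rfl]
            push_cast at h ⊢
            omega
          · right
            refine ⟨c, ?_, ?_⟩
            · intro he
              rcases csnd_pos_mem (show 0 < csnd c rs by omega) with ⟨p, hp, hpc⟩
              have := (List.pairwise_cons.mp hpw').1 p hp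
              rcases this with h2 | ⟨h2, _⟩ <;> rw [he] at hpc <;> omega
            · rw [csnd_cons, if_neg (fun h2 => hc h2.symm)]
              push_cast at hcount ⊢
              omega
        · rintro (h | ⟨c, hc, hcount⟩)
          · exfalso
            rw [hx_absent] at h
            push_cast at h
            omega
          · by_cases hcy : c = y.2
            · left
              subst hcy
              rw [csnd_cons, if_pos rfl] at hcount
              push_cast at hcount ⊢
              omega
            · right
              refine ⟨c, hcy, ?_⟩
              rw [csnd_cons, if_neg (fun h2 => hcy h2.symm)] at hcount
              simpa using hcount

lemma loopA_sorted_iff (data : List (Int × Int)) :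
    (pvLoopA (PySem.List.sorted2 data (fun e => e.2) (fun e => e.1)) 0 = true) ↔
      ∃ c, 3 ≤ csnd c data := by
  have hperm : (PySem.List.sorted2 data (fun e => e.2) (fun e => e.1) false).Perm data :=
    PySem.List.sorted2_perm data _ _ false
  cases hs : PySem.List.sorted2 data (fun e => e.2) (fun e => e.1) false with
  | nil =>
      have hd : data = [] := by
        rw [hs] at hperm
        exact (List.Perm.nil_eq hperm).symm
      subst hd
      simp [pvLoopA, csnd]
  | cons x rest =>
      have hpw := sorted2_pairwise_lexle data
      rw [hs] at hpw
      have hc : ∀ c, csnd c data = csnd c (x :: rest) := by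
        intro c
        unfold csnd
        rw [hs] at hperm
        exact ((hperm.map Prod.snd).count_eq c).symm
      rw [loopA_char rest x hpw 0 le_rfl (by omega)]
      constructor
      · rintro (h | ⟨c, hcne, hcc⟩)
        · refine ⟨x.2, ?_⟩
          rw [hc x.2, csnd_cons, if_pos rfl]
          omega
        · refine ⟨c, ?_⟩
          rw [hc c, csnd_cons, if_neg (fun h2 => hcne h2.symm)]
          omega
      · rintro ⟨c, hcc⟩
        rw [hc c, csnd_cons] at hcc
        by_cases hcx : c = x.2
        · left
          subst hcx
          rw [if_pos rfl] at hcc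
          push_cast
          omega
        · right
          refine ⟨c, hcx, ?_⟩
          rw [if_neg (fun h2 => hcx h2.symm)] at hcc
          omega

lemma alt_iff (data : List (Int × Int)) :
    (check_vertical_end_py_alt data = true) ↔ ∃ c, 3 ≤ csnd c data := by
  unfold check_vertical_end_py_alt
  have hfold : data.foldl (fun d e => d.insert e.2 (d.getD e.2 0 + 1)) (PySem.Dict.empty : PySem.Dict Int Int)
      = PySem.Dict.counter (data.map Prod.snd) := by
    rw [← PySem.Dict.foldl_insert_getD_add_one_eq_counter, List.foldl_map]
  rw [hfold]
  have hvals : (PySem.Dict.counter (data.map Prod.snd)).values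
      = ((PySem.Set.ofList (data.map Prod.snd)).map (fun k => ((data.map Prod.snd).count k : Int))) := by
    show ((PySem.Dict.counter (data.map Prod.snd)).items.map (·.2)) = _
    rw [PySem.Dict.items_counter]
    simp [List.map_map, Function.comp]
  rw [hvals, List.any_map]
  simp only [List.any_eq_true, Function.comp, decide_eq_true_eq]
  constructor
  · rintro ⟨c, _, hcount⟩
    exact ⟨c, by unfold csnd; omega⟩
  · rintro ⟨c, hcount⟩
    refine ⟨c, ?_, ?_⟩
    · rw [PySem.Set.mem_ofList]
      exact List.count_pos_iff.mp (by unfold csnd at hcount; omega)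
    · unfold csnd at hcount; omega

-- ===== VERDICT (by name: the statement is the Claim_ definition above) =====
theorem check_vertical_end_py_spec : Claim_equal_check_vertical_end_py := by
  intro data _
  unfold Spec_check_vertical_end_py
  have h : check_vertical_end_py data = true ↔ check_vertical_end_py_alt data = true := by
    unfold check_vertical_end_py
    rw [loopA_sorted_iff, alt_iff]
  cases ha : check_vertical_end_py data with
  | true => exact (h.mp ha).symm
  | false =>
      cases hb : check_vertical_end_py_alt data with
      | false => rfl
      | true => exact absurd (h.mpr hb) (by simp [ha])
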